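-- pv_equiv track=rewrite | github.com/Lucas-Guimaraes/Reddit-Daily-Programmer | Easy Problems/361-370/366easy.py | funnel
-- ===== SOURCE A (Python) =====
-- def funnel(word, word2):
--     for i in range(len(word)):
--         # Checks where on the index
--         if i == 0:
--             temp_word = word[1:]
--         elif i == len(word):
--             temp_word = word[:len(word)]
--         else:
--             temp_word = word[:i] + word[i + 1:]
--
--         # Checks if it is equal to Word 2
--         if temp_word == word2:
--             return True
--
--     return False
-- ===== SOURCE B (Python) =====
-- def funnel(word, word2):
--     # Two-pointer: delete at the first mismatch position and compare the tails.
--     if len(word) != len(word2) + 1: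
--         return False
--     i = 0
--     n = len(word2)
--     while i < n and word[i] == word2[i]:
--         i += 1
--     return word[i+1:] == word2[i:]
-- ===== Notes on version B (the rewrite author's own statement) =====
-- stated objective: faster
-- what changed: A builds every one-character deletion of word via slicing and compares each with word2; B checks the lengths, advances a single pointer past the common prefix, and compares the remaining tails once.
import Mathlib
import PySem

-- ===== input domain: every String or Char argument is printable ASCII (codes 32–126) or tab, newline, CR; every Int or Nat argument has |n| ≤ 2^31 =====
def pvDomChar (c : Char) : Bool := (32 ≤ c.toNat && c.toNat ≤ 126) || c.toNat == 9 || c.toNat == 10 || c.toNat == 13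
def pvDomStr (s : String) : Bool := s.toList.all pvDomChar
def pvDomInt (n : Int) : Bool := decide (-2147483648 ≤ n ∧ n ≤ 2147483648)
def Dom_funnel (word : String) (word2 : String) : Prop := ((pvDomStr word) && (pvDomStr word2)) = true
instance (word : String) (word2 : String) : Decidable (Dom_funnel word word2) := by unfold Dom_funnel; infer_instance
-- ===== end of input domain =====

-- B replaces A's try-every-deletion O(n^2) scan by a single two-pointer pass: delete at the
-- first mismatch and compare the remaining tails (faster, asymptotic).


-- ===== PORT A =====
-- literal transliteration of A: for i in range(len(word)) build temp_word by the same
-- three slice branches and return True on the first temp_word == word2 (List.any).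
def funnel (word : String) (word2 : String) : Bool :=
  let w := word.toList
  let n : Int := w.length
  (PySem.List.pyRange 0 n 1).any fun i =>
    let temp_word : List Char :=
      if i == 0 then PySem.List.slice w (some 1) none
      else if i == n then PySem.List.slice w none (some n)
      else PySem.List.slice w none (some i) ++ PySem.List.slice w (some (i + 1)) none
    temp_word == word2.toList

-- ===== PORT B =====
-- the while loop of Source B: length of the common prefix of the two lists
def cplB : List Char → List Char → Nat
  | x :: xs, y :: ys => if x == y then cplB xs ys + 1 else 0
  | _, _ => 0

def funnel_alt (word : String) (word2 : String) : Bool :=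
  let w := word.toList
  let v := word2.toList
  if w.length == v.length + 1 then
    let i := cplB w v          -- the guard gives w.length > v.length, so the scan stops exactly
                               -- where Source B's 'i < len(word2) and word[i] == word2[i]' does
    w.drop (i + 1) == v.drop i -- word[i+1:] == word2[i:]  (nonneg indices: slice = drop)
  else
    false

-- ===== PRECONDITION & SPEC =====
def Spec_funnel (word : String) (word2 : String) (out : Bool) : Prop := out = funnel_alt word word2
instance (word : String) (word2 : String) (out : Bool) : Decidable (Spec_funnel word word2 out) := by unfold Spec_funnel; infer_instance

-- ===== CLAIM (what is proved, stated in full; the proofs are below) =====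
def Claim_equal_funnel : Prop := ∀ (word : String) (word2 : String), Dom_funnel word word2 → Spec_funnel word word2 (funnel word word2)

-- ===== LEMMAS AND PROOFS =====

-- middle ground: recursive "some one-char deletion of w equals v"
def anyDel : List Char → List Char → Bool
  | [], _ => false
  | x :: xs, v =>
    (xs == v) ||
      (match v with
       | [] => false
       | y :: ys => (x == y) && anyDel xs ys)

theorem anyDel_cons_self (x : Char) (l : List Char) : anyDel (x :: l) l = true := by
  simp [anyDel]

theorem funnel_alt_eq_anyDel (w v : List Char) :
    (if w.length == v.length + 1 then w.drop (cplB w v + 1) == v.drop (cplB w v) else false)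
      = anyDel w v := by
  induction w generalizing v with
  | nil => cases v <;> simp [anyDel]
  | cons x xs ih =>
    cases v with
    | nil =>
      cases xs <;> simp [anyDel, cplB]
    | cons y ys =>
      by_cases hxy : x = y
      · subst hxy
        have := ih ys
        simp only [anyDel, cplB, if_pos rfl, beq_self_eq_true, Bool.true_and]
        by_cases hxs : xs = x :: ys
        · subst hxs
          simp [anyDel_cons_self, cplB, List.drop_succ_cons]
        · have hbeq : (xs == x :: ys) = false := by simp [hxs]
          rw [hbeq, Bool.false_or, ← this]
          simp [List.length_cons, Nat.add_left_cancel_iff, List.drop_succ_cons]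
      · have hbeq : (x == y) = false := by simp [hxy]
        simp only [anyDel, cplB, hbeq, if_neg hxy, Bool.false_and, Bool.or_false,
          Nat.zero_add, List.drop_succ_cons, List.drop_one, List.drop_zero]
        by_cases hxs : xs = y :: ys
        · subst hxs; simp
        · simp [hxs]

theorem funnel_eq_anyDel (w v : List Char) :
    (List.range w.length).any (fun k => (w.take k ++ w.drop (k + 1)) == v) = anyDel w v := by
  induction w generalizing v with
  | nil => simp [anyDel]
  | cons x xs ih =>
    rw [List.length_cons, List.range_succ_eq_map, List.any_cons, List.any_map]
    simp only [Function.comp_def, List.take_succ_cons, List.drop_succ_cons, List.take_zero,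
      List.drop_one, List.nil_append, List.cons_append, List.tail_cons]
    cases v with
    | nil =>
      simp [anyDel]
    | cons y ys =>
      by_cases hxy : x = y
      · subst hxy
        simp only [anyDel, List.cons_beq_cons, beq_self_eq_true, Bool.true_and, ← ih ys]
        rfl
      · have hbeq : (x == y) = false := by simp [hxy]
        simp [anyDel, List.cons_beq_cons, hbeq]

theorem any_congr' {a : Type} (l : List a) (p q : a -> Bool)
    (h : forall x, x ∈ l -> p x = q x) : l.any p = l.any q := by
  induction l with
  | nil => rfl
  | cons z zs ih =>
    simp only [List.any_cons, h z (List.mem_cons_self), ih fun x hx => h x (List.mem_cons_of_mem z hx)]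

theorem temp_eq (w : List Char) (k : Nat) (hk : k < w.length) :
    (if ((k : Int) == 0) then PySem.List.slice w (some 1) none
     else if ((k : Int) == (w.length : Int)) then PySem.List.slice w none (some (w.length : Int))
     else PySem.List.slice w none (some (k : Int)) ++ PySem.List.slice w (some ((k : Int) + 1)) none)
      = w.take k ++ w.drop (k + 1) := by
  by_cases h0 : k = 0
  · subst h0
    simp [PySem.List.slice_from_one, List.drop_one]
  · have hkl : k ≠ w.length := Nat.ne_of_lt hk
    have c0 : ((k : Int) == 0) = false := by simp [h0]
    have c1 : ((k : Int) == (w.length : Int)) = false := by simp [hkl]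
    rw [c0, c1]
    simp only [Bool.false_eq_true, if_false]
    rw [PySem.List.slice_to w (by exact_mod_cast Nat.zero_le k),
        PySem.List.slice_from w (show (0 : Int) ≤ (k : Int) + 1 by positivity)]
    have hto : ((k : Int) + 1).toNat = k + 1 := by omega
    simp [hto]

theorem funnel_eq (word word2 : String) :
    funnel word word2 = anyDel word.toList word2.toList := by
  simp only [funnel, PySem.List.pyRange_one, Int.sub_zero, Int.toNat_natCast, List.any_map,
    Function.comp_def, Int.zero_add, Nat.cast_id]
  rw [any_congr' _ _ (fun k => (word.toList.take k ++ word.toList.drop (k + 1)) == word2.toList)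
      (fun k hk => by rw [temp_eq word.toList k (List.mem_range.mp hk)])]
  exact funnel_eq_anyDel word.toList word2.toList

-- ===== VERDICT (by name: the statement is the Claim_ definition above) =====
theorem funnel_spec : Claim_equal_funnel := by
  intro word word2 _
  unfold Spec_funnel
  rw [funnel_eq]
  have h := funnel_alt_eq_anyDel word.toList word2.toList
  unfold funnel_alt
  exact h.symm
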